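-- pv_equiv track=rewrite | github.com/thaibinhbr97/MITx-6.00.1x | 6001x/Exercises/biggest.py | biggest1
-- ===== SOURCE A (Python) =====
-- def biggest1(aDict):
--     '''
--     aDict: A dictionary, where all the values are lists.
--
--     returns: The key with the largest number of values associated with it
--     '''
--     # Your Code Here
--     dic = {}
--     for key,value in aDict.items():
--         dic[key] = len(value)
--     best = max(dic.values())
--     words = []
--     for k in dic:
--         if dic[k] == best:
--             words.append(k)
--     if len(words) == 0:
--         return None
--     else:
--         return words[0]
-- ===== SOURCE B (Python) =====
-- def biggest1(aDict):
--     '''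
--     aDict: A dictionary, where all the values are lists.
--
--     returns: The key with the largest number of values associated with it
--     '''
--     return max(aDict, key=lambda k: len(aDict[k]))
-- ===== Notes on version B (the rewrite author's own statement) =====
-- stated objective: idiomatic
-- what changed: Replaces the length table, the separate max over its values and the second filtering pass with a single keyed max over the keys (one pass, no auxiliary dict or list); max's first-maximal rule reproduces A's tie-break and it raises ValueError on the empty dict exactly as A does.
-- outside the precondition, e.g. on biggest1({}): A raises ValueError, B raises ValueError
import Mathlib
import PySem

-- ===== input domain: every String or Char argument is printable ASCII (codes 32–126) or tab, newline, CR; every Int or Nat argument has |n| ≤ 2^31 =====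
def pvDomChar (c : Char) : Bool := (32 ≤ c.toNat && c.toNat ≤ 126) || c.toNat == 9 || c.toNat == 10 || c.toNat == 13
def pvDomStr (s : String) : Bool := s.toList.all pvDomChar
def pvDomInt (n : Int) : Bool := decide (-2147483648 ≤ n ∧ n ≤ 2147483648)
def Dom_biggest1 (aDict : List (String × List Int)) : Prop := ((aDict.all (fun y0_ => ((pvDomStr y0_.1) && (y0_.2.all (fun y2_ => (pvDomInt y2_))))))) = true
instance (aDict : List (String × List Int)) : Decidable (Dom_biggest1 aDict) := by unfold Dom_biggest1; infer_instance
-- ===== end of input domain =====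

-- B replaces A's length table, the separate max over its values and the second filtering
-- pass by one keyed max over the dict entries (idiomatic).

-- ===== PORT A =====
def biggest1 (aDict : List (String × List Int)) : Option String :=
  -- dic = {}; for key,value in aDict.items(): dic[key] = len(value)
  let dic : PySem.Dict String Int :=
    aDict.foldl (fun d kv => d.insert kv.1 (kv.2.length : Int)) PySem.Dict.empty
  -- best = max(dic.values())  -- raises ValueError on an empty dict (none here; excluded by Pre_)
  match PySem.List.max? dic.values (fun v => v) with
  | none => none
  | some best =>
    -- words = []; for k in dic: if dic[k] == best: words.append(k)
    let words : List String :=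
      dic.keys.foldl (fun ws k => if dic.getD k 0 = best then ws ++ [k] else ws) []
    -- if len(words) == 0: return None else: return words[0]  (in range: the guard holds)
    if words.length = 0 then none else words.head?

-- ===== PORT B =====
-- max(aDict, key=lambda k: len(aDict[k])): iterating a dict yields its keys in insertion
-- order and aDict[k] is the value stored with k (the keys are unique, see Pre_), so this
-- is max? over the (key, value) pairs keyed by the value's length, projected to the key;
-- max() raises ValueError on an empty dict (none here; excluded by Pre_).
def biggest1_alt (aDict : List (String × List Int)) : Option String :=
  (PySem.List.max? aDict (fun kv => (kv.2.length : Int))).map (·.1)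

-- ===== PRECONDITION & SPEC =====
-- aDict ≠ []: on the empty dict max() raises ValueError in both A and B (no value returned).
-- Nodup keys: the argument is a Python dict, which cannot hold two pairs with the same
-- key — this clause only states that representation invariant of the dict encoding.
def Pre_biggest1 (aDict : List (String × List Int)) : Prop :=
  aDict ≠ [] ∧ (aDict.map Prod.fst).Nodup
instance (aDict : List (String × List Int)) : Decidable (Pre_biggest1 aDict) := by
  unfold Pre_biggest1; infer_instance

def pvWitness_biggest1 : (List (String × List Int)) := [("a", [1, 2]), ("b", [3])]

def Spec_biggest1 (aDict : List (String × List Int)) (out : Option String) : Prop := out = biggest1_alt aDict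
instance (aDict : List (String × List Int)) (out : Option String) : Decidable (Spec_biggest1 aDict out) := by unfold Spec_biggest1; infer_instance

-- ===== CLAIM (what is proved, stated in full; the proofs are below) =====
def Claim_equal_biggest1 : Prop := ∀ (aDict : List (String × List Int)), Dom_biggest1 aDict → Pre_biggest1 aDict → Spec_biggest1 aDict (biggest1 aDict)

-- ===== LEMMAS AND PROOFS =====

-- max? is the running arg-max loop that keeps the earlier element on a tie.
theorem max?_cons_argmax {α : Type} (key : α → Int) (t : List α) (x : α) :
    PySem.List.max? (x :: t) key
      = some (t.foldl (fun a y => if key a < key y then y else a) x) := by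
  show List.foldl _ (some x) t = _
  induction t generalizing x with
  | nil => rfl
  | cons y t ih =>
      simp only [List.foldl_cons]
      by_cases h : key x < key y <;> simp [h, ih]

-- The FIRST element whose key attains the maximum IS that arg-max (A's tie-break = B's).
theorem find?_argmax {α : Type} (key : α → Int) (t : List α) (x : α) :
    (x :: t).find? (fun y => key y == (t.map key).foldl max (key x))
      = some (t.foldl (fun a y => if key a < key y then y else a) x) := by
  induction t generalizing x with
  | nil => simp
  | cons y t ih =>
    have hx' : max (key x) (key y) = key (if key x < key y then y else x) := by
      by_cases h : key x < key y <;> simp [h] <;> omega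
    simp only [List.map_cons, List.foldl_cons, hx']
    have hM : key (if key x < key y then y else x)
        ≤ (t.map key).foldl max (key (if key x < key y then y else x)) :=
      (PySem.List.le_foldl_max _ _).1
    by_cases h : key x < key y
    · simp only [if_pos h] at *
      rw [List.find?_cons_of_neg (by simp only [beq_iff_eq]; omega)]
      exact ih y
    · simp only [if_neg h] at *
      have hIH := ih x
      by_cases hpx : key x = (t.map key).foldl max (key x)
      · rw [List.find?_cons_of_pos (by simp only [beq_iff_eq]; omega)]
        rw [List.find?_cons_of_pos (by simp only [beq_iff_eq]; omega)] at hIH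
        exact hIH
      · have hyx : key y ≤ key x := by omega
        rw [List.find?_cons_of_neg (by simp only [beq_iff_eq]; omega),
            List.find?_cons_of_neg (by simp only [beq_iff_eq]; omega)]
        rw [List.find?_cons_of_neg (by simp only [beq_iff_eq]; omega)] at hIH
        exact hIH

theorem biggest1_eq_alt (aDict : List (String × List Int)) (hne : aDict ≠ [])
    (hnd : (aDict.map Prod.fst).Nodup) : biggest1 aDict = biggest1_alt aDict := by
  cases aDict with
  | nil => exact absurd rfl hne
  | cons x t =>
    simp only [biggest1, biggest1_alt]
    set key : String × List Int → Int := fun kv => (kv.2.length : Int) with hkey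
    set dic : PySem.Dict String Int :=
      (x :: t).foldl (fun d kv => d.insert kv.1 (kv.2.length : Int)) PySem.Dict.empty with hdic
    have hitems : dic.items = (x :: t).map (fun kv => (kv.1, key kv)) := by
      have h := PySem.Dict.items_foldl_insert_fresh (x :: t) Prod.fst
        (fun kv => (kv.2.length : Int)) PySem.Dict.empty
        (fun a _ => PySem.Dict.contains_empty a.1) hnd
      simpa [hdic] using h
    have hkeys : dic.keys = (x :: t).map Prod.fst := by
      show dic.items.map Prod.fst = _
      simp [hitems, Function.comp]
    have hvals : dic.values = key x :: t.map key := by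
      show dic.items.map Prod.snd = _
      simp [hitems, Function.comp]
    have hknd : dic.keys.Nodup := by rw [hkeys]; exact hnd
    rw [hvals, max?_cons_argmax (fun v => v) (t.map key) (key x)]
    have hmaxfun : (fun (a y : Int) => if a < y then y else a) = max := by
      funext a y; by_cases h : a < y <;> simp [h] <;> omega
    rw [hmaxfun]
    set best : Int := (t.map key).foldl max (key x) with hbest
    have hgetD : ∀ kv ∈ (x :: t), dic.getD kv.1 0 = key kv := by
      intro kv hm
      have hmem : (kv.1, key kv) ∈ dic.items := by
        rw [hitems]; exact List.mem_map_of_mem hm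
      exact PySem.Dict.getD_of_mem_items dic hmem hknd 0
    -- the words loop is a filter over the keys, i.e. over the first components
    have hwords : dic.keys.foldl (fun ws k => if dic.getD k 0 = best then ws ++ [k] else ws) []
        = ((x :: t).filter (fun kv => key kv == best)).map Prod.fst := by
      have hfun : (fun (ws : List String) k => if dic.getD k 0 = best then ws ++ [k] else ws)
          = (fun ws k => if (fun k => decide (dic.getD k 0 = best)) k = true
              then ws ++ [id k] else ws) := by
        funext ws k; by_cases h : dic.getD k 0 = best <;> simp [h]
      rw [hfun, PySem.List.foldl_append_if, hkeys, List.filter_map]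
      simp only [List.nil_append, List.map_map]
      congr 1
      · apply List.filter_congr
        intro kv hm
        simp only [Function.comp, hgetD kv hm]
        by_cases h : key kv = best <;> simp [h]
    show (if (List.foldl (fun ws k => if dic.getD k 0 = best then ws ++ [k] else ws) [] dic.keys).length = 0
        then none
        else (List.foldl (fun ws k => if dic.getD k 0 = best then ws ++ [k] else ws) [] dic.keys).head?)
      = Option.map (fun p => p.1) (PySem.List.max? (x :: t) key)
    rw [hwords]
    have hfind := find?_argmax key t x
    have hhead : (((x :: t).filter (fun kv => key kv == best)).map Prod.fst).head?
        = some ((t.foldl (fun a y => if key a < key y then y else a) x).1) := by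
      rw [List.head?_map, List.head?_filter, hbest, hfind, Option.map_some]
    have hnenil : ((x :: t).filter (fun kv => key kv == best)).map Prod.fst ≠ [] := by
      intro hc; rw [hc] at hhead; simp at hhead
    rw [if_neg (by simpa [List.length_eq_zero_iff] using hnenil), hhead,
        max?_cons_argmax key t x]
    rfl

-- ===== VERDICT (by name: the statement is the Claim_ definition above) =====
theorem biggest1_spec : Claim_equal_biggest1 := by
  intro aDict _ hpre
  exact biggest1_eq_alt aDict hpre.1 hpre.2
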